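-- pv_equiv track=rewrite | github.com/ranjan0-max/subnet-id-python | subnet_id.py | ipt
-- ===== SOURCE A (Python) =====
-- def subnetid(cf):
--     bit=int(cf/8)
--     nb=cf-(8*bit)
--     s=0
--     count=7
--     for _ in range(0,nb):
--         s+=(2**count)
--         count=count-1
--     return s
--
-- def ipt(ip,cf):
--     bit=int(cf/8)
--     subid=ip
--     count=0
--     for i in range(bit,4):
--         if count==0:
--             subid[i]=subnetid(cf)&subid[i]
--             count=count+1
--         else:
--             subid[i]=0
--     return subid
-- ===== SOURCE B (Python) =====
-- def ipt(ip, cf):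
--     # closed-form netmask instead of A's bit-accumulation loop and count-flag loop;
--     # mutates ip in place like A does
--     bit = int(cf / 8)
--     nb = cf - 8 * bit
--     mask = (0xFF << (8 - nb)) & 0xFF if nb > 0 else 0
--     if bit < 4:
--         ip[bit] = mask & ip[bit]
--         for i in range(bit + 1, 4):
--             ip[i] = 0
--     return ip
-- ===== Notes on version B (the rewrite author's own statement) =====
-- stated objective: simpler
-- what changed: Replaces A's bit-accumulation loop (subnetid) with a closed-form shift mask, and A's count-flag octet loop with one direct masked assignment followed by a plain zeroing loop.
import Mathlib
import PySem

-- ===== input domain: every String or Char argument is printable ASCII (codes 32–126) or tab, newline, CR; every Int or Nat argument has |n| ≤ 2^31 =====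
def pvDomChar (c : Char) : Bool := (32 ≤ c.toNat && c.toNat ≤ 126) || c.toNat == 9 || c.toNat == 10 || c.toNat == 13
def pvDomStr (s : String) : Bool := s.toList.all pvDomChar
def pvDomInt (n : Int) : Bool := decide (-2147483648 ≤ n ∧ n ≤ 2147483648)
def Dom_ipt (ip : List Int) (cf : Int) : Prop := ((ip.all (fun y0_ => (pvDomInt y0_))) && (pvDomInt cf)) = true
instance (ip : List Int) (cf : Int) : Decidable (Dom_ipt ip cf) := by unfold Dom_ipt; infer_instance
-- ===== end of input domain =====

-- B replaces A's bit-accumulation loop and count-flag loop with a closed-form shift mask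
-- plus one direct masked assignment and a plain zeroing loop (objective: simpler/idiomatic).
-- Both A and B mutate ip in place in the same order; the theorems are about the return value.

-- ===== PORT A =====
-- int(cf/8) is exact truncating division for |cf| ≤ 2^31 (PySem.Int.truncdiv);
-- 2**count stays in count ≥ 0 territory here, so (2:Int)^count.toNat is exact.
def subnetid (cf : Int) : Int :=
  let bit := PySem.Int.truncdiv cf 8
  let nb := cf - 8 * bit
  let st := (PySem.List.pyRange 0 nb 1).foldl
      (fun (p : Int × Int) _ => (p.1 + 2 ^ p.2.toNat, p.2 - 1)) ((0 : Int), (7 : Int))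
  st.1

-- subid[i] = … and reading subid[i]: pySetD/pyGetD are exact where Python does not raise
-- (Pre_ipt excludes the IndexError inputs).
def ipt (ip : List Int) (cf : Int) : List Int :=
  let bit := PySem.Int.truncdiv cf 8
  let st := (PySem.List.pyRange bit 4 1).foldl
      (fun (st : List Int × Int) i =>
        if st.2 == 0 then
          (PySem.List.pySetD st.1 i (PySem.Int.band (subnetid cf) (PySem.List.pyGetD st.1 i 0)), st.2 + 1)
        else
          (PySem.List.pySetD st.1 i 0, st.2))
      (ip, (0 : Int))
  st.1

-- ===== PORT B =====
-- nb = cf - 8*int(cf/8) lies in (-8, 8), so when nb > 0 the shift amount 8 - nb is in 1..7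
-- and (8 - nb).toNat is exact.
def ipt_alt (ip : List Int) (cf : Int) : List Int :=
  let bit := PySem.Int.truncdiv cf 8
  let nb := cf - 8 * bit
  let mask : Int := if nb > 0 then PySem.Int.band ((255 : Int) <<< (8 - nb).toNat) 255 else 0
  if bit < 4 then
    let ip1 := PySem.List.pySetD ip bit (PySem.Int.band mask (PySem.List.pyGetD ip bit 0))
    (PySem.List.pyRange (bit + 1) 4 1).foldl (fun l i => PySem.List.pySetD l i 0) ip1
  else ip

-- ===== PRECONDITION & SPEC =====
-- Exactly the inputs on which A returns: if bit = int(cf/8) < 4 the loop touches indices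
-- bit..3 (Python indexing, negative from the end), so it needs len(ip) ≥ 4 and bit ≥ -len(ip);
-- otherwise the loop is empty and A always returns.
def Pre_ipt (ip : List Int) (cf : Int) : Prop :=
  4 ≤ PySem.Int.truncdiv cf 8 ∨
    (4 ≤ (ip.length : Int) ∧ -(ip.length : Int) ≤ PySem.Int.truncdiv cf 8)
instance (ip : List Int) (cf : Int) : Decidable (Pre_ipt ip cf) := by unfold Pre_ipt; infer_instance
def pvWitness_ipt : List Int × Int := ([192, 168, 3, 7], 20)

def Spec_ipt (ip : List Int) (cf : Int) (out : List Int) : Prop := out = ipt_alt ip cf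
instance (ip : List Int) (cf : Int) (out : List Int) : Decidable (Spec_ipt ip cf out) := by unfold Spec_ipt; infer_instance

-- ===== CLAIM (what is proved, stated in full; the proofs are below) =====
def Claim_equal_ipt : Prop := ∀ (ip : List Int) (cf : Int), Dom_ipt ip cf → Pre_ipt ip cf → Spec_ipt ip cf (ipt ip cf)

-- ===== LEMMAS AND PROOFS =====

-- A's bit-accumulation loop, as a function of nb alone, equals B's closed-form mask.
theorem subnetid_loop_eq_mask (nb : Int) (h1 : -8 < nb) (h2 : nb < 8) :
    ((PySem.List.pyRange 0 nb 1).foldl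
        (fun (p : Int × Int) _ => (p.1 + 2 ^ p.2.toNat, p.2 - 1)) ((0 : Int), (7 : Int))).1 =
      (if nb > 0 then PySem.Int.band ((255 : Int) <<< (8 - nb).toNat) 255 else 0) := by
  interval_cases nb <;> decide

theorem subnetid_eq_mask (cf : Int) :
    subnetid cf =
      (if cf - 8 * PySem.Int.truncdiv cf 8 > 0 then
        PySem.Int.band ((255 : Int) <<< (8 - (cf - 8 * PySem.Int.truncdiv cf 8)).toNat) 255
      else 0) := by
  have hmod : cf - 8 * PySem.Int.truncdiv cf 8 = cf.tmod 8 := by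
    simp [PySem.Int.truncdiv, Int.tmod_def]
  have h1 : -8 < cf.tmod 8 := Int.lt_tmod_of_pos cf (by norm_num)
  have h2 : cf.tmod 8 < 8 := Int.tmod_lt_of_pos cf (by norm_num)
  rw [subnetid, hmod]
  exact subnetid_loop_eq_mask _ h1 h2

-- Once count ≠ 0, A's loop only ever takes the zeroing branch and never changes count.
theorem tail_loop_eq (cf : Int) (l : List Int) (s : List Int) (c : Int) (hc : c ≠ 0) :
    (l.foldl
        (fun (st : List Int × Int) i =>
          if st.2 == 0 then
            (PySem.List.pySetD st.1 i (PySem.Int.band (subnetid cf) (PySem.List.pyGetD st.1 i 0)), st.2 + 1)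
          else
            (PySem.List.pySetD st.1 i 0, st.2))
        (s, c)).1 =
      l.foldl (fun t i => PySem.List.pySetD t i 0) s := by
  induction l generalizing s with
  | nil => rfl
  | cons x xs ih =>
      simp only [List.foldl_cons]
      rw [if_neg (by simpa using hc)]
      exact ih _

-- ===== VERDICT (by name: the statement is the Claim_ definition above) =====
theorem ipt_spec : Claim_equal_ipt := by
  intro ip cf _ _
  unfold Spec_ipt ipt ipt_alt
  dsimp only
  by_cases hb : PySem.Int.truncdiv cf 8 < 4
  · rw [PySem.List.pyRange_one_cons hb, List.foldl_cons, if_pos hb]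
    simp only [beq_self_eq_true, if_true, zero_add]
    rw [tail_loop_eq cf _ _ 1 one_ne_zero, subnetid_eq_mask]
  · rw [PySem.List.pyRange_one_eq_nil (by omega), if_neg hb]
    rfl
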